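-- pv_equiv track=rewrite | github.com/junwson9/algorithm | 백준/Gold/1407. 2로 몇 번 나누어질까/2로 몇 번 나누어질까.py | calc
-- ===== SOURCE A (Python) =====
-- def calc(n):
--     if n == 0:
--         return 0
--     elif n == 1:
--         return 1
--     elif n % 2 == 0:
--         return n // 2 + 2*calc(n//2)
--     elif n % 2 == 1:
--         return n // 2 + 2*calc(n//2)+1
-- ===== SOURCE B (Python) =====
-- def calc(n):
--     result = 0
--     weight = 1
--     m = n
--     while m > 0:
--         result += weight * ((m + 1) // 2)
--         m //= 2
--         weight *= 2
--     return result
-- ===== Notes on version B (the rewrite author's own statement) =====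
-- stated objective: alternative
-- what changed: Replaces the self-call recursion by an explicit least-to-most-significant loop that accumulates weight * ceil(m/2) while halving m and doubling the weight.
import Mathlib
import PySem

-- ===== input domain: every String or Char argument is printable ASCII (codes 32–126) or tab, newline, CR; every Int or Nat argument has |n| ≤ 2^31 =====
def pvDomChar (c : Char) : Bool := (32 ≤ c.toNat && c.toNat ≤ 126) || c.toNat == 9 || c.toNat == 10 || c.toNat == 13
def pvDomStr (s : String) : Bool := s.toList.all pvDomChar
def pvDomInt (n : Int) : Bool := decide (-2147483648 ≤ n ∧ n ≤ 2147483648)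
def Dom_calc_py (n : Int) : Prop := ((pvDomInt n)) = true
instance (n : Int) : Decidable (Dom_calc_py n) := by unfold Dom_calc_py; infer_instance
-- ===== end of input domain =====

-- B replaces A's self-call recursion by an explicit least-to-most-significant halving loop
-- accumulating weight * ceil(m/2); same cost, different decomposition (objective: alternative).

-- ===== PORT A =====
-- A's recursion, with fuel making it total in Lean; fuel n.toNat + 1 suffices on the
-- precondition 0 ≤ n (in Python, negative n recurses forever: excluded by Pre_).
def pvCalcA : Nat → Int → Int
  | 0, _ => 0
  | fuel + 1, n =>
    if n = 0 then 0
    else if n = 1 then 1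
    else if PySem.Int.mod n 2 = 0 then
      PySem.Int.floordiv n 2 + 2 * pvCalcA fuel (PySem.Int.floordiv n 2)
    else  -- Python's final 'elif n % 2 == 1' always holds here (n % 2 ∈ {0,1} for ints)
      PySem.Int.floordiv n 2 + 2 * pvCalcA fuel (PySem.Int.floordiv n 2) + 1

def calc_py (n : Int) : Int := pvCalcA (n.toNat + 1) n

-- ===== PORT B =====
-- B's while-loop (fuel n.toNat + 1 suffices: m strictly halves while m > 0).
def pvCalcB : Nat → Int → Int → Int → Int
  | 0, _, _, result => result
  | fuel + 1, m, weight, result =>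
    if m > 0 then
      pvCalcB fuel (PySem.Int.floordiv m 2) (weight * 2)
        (result + weight * PySem.Int.floordiv (m + 1) 2)
    else result

def calc_py_alt (n : Int) : Int := pvCalcB (n.toNat + 1) n 1 0

-- ===== PRECONDITION & SPEC =====
-- A recurses forever (RecursionError) on negative n, so Pre_ keeps exactly the inputs where A returns.
def Pre_calc_py (n : Int) : Prop := 0 ≤ n
instance (n : Int) : Decidable (Pre_calc_py n) := by unfold Pre_calc_py; infer_instance
def pvWitness_calc_py : Int := (6)

def Spec_calc_py (n : Int) (out : Int) : Prop := out = calc_py_alt n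
instance (n : Int) (out : Int) : Decidable (Spec_calc_py n out) := by unfold Spec_calc_py; infer_instance

-- ===== CLAIM (what is proved, stated in full; the proofs are below) =====
def Claim_equal_calc_py : Prop := ∀ (n : Int), Dom_calc_py n → Pre_calc_py n → Spec_calc_py n (calc_py n)

-- ===== LEMMAS AND PROOFS =====

-- the common value, as a Nat-indexed function
def pvS (m : Nat) : Int :=
  if h : m = 0 then 0
  else (((m + 1) / 2 : Nat) : Int) + 2 * pvS (m / 2)
decreasing_by exact Nat.div_lt_self (Nat.pos_of_ne_zero h) (by omega)

lemma pvCalcA_eq_pvS : ∀ (fuel : Nat) (n : Int), 0 ≤ n → n.toNat < fuel →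
    pvCalcA fuel n = pvS n.toNat := by
  intro fuel
  induction fuel with
  | zero => intro n _ h; omega
  | succ f ih =>
    intro n hn hf
    rcases eq_or_lt_of_le hn with h0 | h0
    · simp [pvCalcA, ← h0, pvS]
    rcases eq_or_lt_of_le (by omega : (1 : Int) ≤ n) with h1 | h1
    · rw [pvCalcA, if_neg (by omega), if_pos (by omega)]
      rw [show n.toNat = 1 by omega]
      rw [pvS]; simp [pvS]
    · -- n ≥ 2
      have hcast : n = ((n.toNat : Int)) := by omega
      have hfd : PySem.Int.floordiv n 2 = ((n.toNat / 2 : Nat) : Int) := by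
        rw [hcast]; exact_mod_cast PySem.Int.floordiv_natCast n.toNat 2
      have hmod : PySem.Int.mod n 2 = ((n.toNat % 2 : Nat) : Int) := by
        rw [hcast]; exact_mod_cast PySem.Int.mod_natCast n.toNat 2
      have hrec : pvCalcA f ((n.toNat / 2 : Nat) : Int) = pvS (n.toNat / 2) := by
        have := ih ((n.toNat / 2 : Nat) : Int) (by positivity) (by rw [Int.toNat_natCast]; omega)
        rwa [Int.toNat_natCast] at this
      rw [pvCalcA, if_neg (by omega), if_neg (by omega)]
      rw [pvS, dif_neg (by omega)]
      by_cases he : n.toNat % 2 = 0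
      · rw [if_pos (by rw [hmod, he]; simp), hfd, hrec]
        have h2 : (n.toNat + 1) / 2 = n.toNat / 2 := by omega
        rw [h2]
      · rw [if_neg (by rw [hmod]; omega), hfd, hrec]
        have h2 : (n.toNat + 1) / 2 = n.toNat / 2 + 1 := by omega
        rw [h2]; push_cast; ring

lemma pvCalcB_eq_pvS : ∀ (fuel : Nat) (m w r : Int), 0 ≤ m → m.toNat < fuel →
    pvCalcB fuel m w r = r + w * pvS m.toNat := by
  intro fuel
  induction fuel with
  | zero => intro m w r _ h; omega
  | succ f ih =>
    intro m w r hm hf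
    rcases eq_or_lt_of_le hm with h0 | h0
    · rw [pvCalcB, if_neg (by omega)]
      rw [show m.toNat = 0 by omega, pvS]; simp
    · have hcast : m = ((m.toNat : Int)) := by omega
      have hfd : PySem.Int.floordiv m 2 = ((m.toNat / 2 : Nat) : Int) := by
        rw [hcast]; exact_mod_cast PySem.Int.floordiv_natCast m.toNat 2
      have hfd1 : PySem.Int.floordiv (m + 1) 2 = (((m.toNat + 1) / 2 : Nat) : Int) := by
        rw [hcast]; exact_mod_cast PySem.Int.floordiv_natCast (m.toNat + 1) 2
      rw [pvCalcB, if_pos h0, hfd, hfd1]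
      rw [ih _ _ _ (by positivity) (by rw [Int.toNat_natCast]; omega)]
      rw [Int.toNat_natCast]
      have hS : pvS m.toNat = (((m.toNat + 1) / 2 : Nat) : Int) + 2 * pvS (m.toNat / 2) := by
        rw [pvS, dif_neg (by omega)]
      rw [hS]; ring

-- ===== VERDICT (by name: the statement is the Claim_ definition above) =====
theorem calc_py_spec : Claim_equal_calc_py := by
  intro n _ hpre
  unfold Spec_calc_py calc_py calc_py_alt
  rw [pvCalcA_eq_pvS _ _ hpre (by omega), pvCalcB_eq_pvS _ _ _ _ hpre (by omega)]
  ring
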